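-- pv_equiv track=rewrite | github.com/YulissaLopezC/PythonExe | ejercicio14.py | two_digits
-- ===== SOURCE A (Python) =====
-- def two_digits(num):
--     dig = 0
--     while num != 0 and num != -1:
--         dig += 1
--         num = int(num / 10)
--
--     if dig == 2:
--         return True
--     else:
--         return False
-- ===== SOURCE B (Python) =====
-- def two_digits(num):
--     return 10 <= abs(num) < 100
-- ===== Notes on version B (the rewrite author's own statement) =====
-- stated objective: simpler
-- what changed: Replaced the digit-counting division loop with a direct O(1) range test on the absolute value (two-digit interval check).
-- intended difference: On negative inputs in [-199,-100] A returns True and in [-19,-10] A returns False, because its 'num != -1' loop stop miscounts digits of negatives by one; B returns whether |num| really has two digits, the intended meaning. — e.g. on two_digits(-10): A returns false, B returns true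
import Mathlib
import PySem

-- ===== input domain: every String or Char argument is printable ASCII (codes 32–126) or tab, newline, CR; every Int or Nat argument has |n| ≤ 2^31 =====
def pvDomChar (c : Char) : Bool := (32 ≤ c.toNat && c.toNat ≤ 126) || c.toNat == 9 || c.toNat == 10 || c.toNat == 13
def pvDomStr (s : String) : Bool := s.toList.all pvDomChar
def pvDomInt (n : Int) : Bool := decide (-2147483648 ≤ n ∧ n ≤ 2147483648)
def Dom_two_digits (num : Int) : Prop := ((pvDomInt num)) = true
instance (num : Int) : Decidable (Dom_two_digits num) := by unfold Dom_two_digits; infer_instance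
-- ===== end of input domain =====

-- B replaces A's digit-counting division loop by a direct range test 10 <= |num| < 100;
-- on negatives A's 'num != -1' stop miscounts by one (see D_ below). Objective: simpler.

-- ===== PORT A =====
-- termination helper for the while-loop port: |int(num/10)| = |num| / 10
theorem pvTdivNatAbs (n : Int) : (n.tdiv 10).natAbs = n.natAbs / 10 := by
  rcases (em (0 ≤ n)) with h | h
  · rw [Int.tdiv_eq_ediv_of_nonneg h]; omega
  · rw [show n = -(-n) by ring, Int.neg_tdiv, Int.tdiv_eq_ediv_of_nonneg (by omega)]; omega

-- while num != 0 and num != -1: dig += 1; num = int(num / 10)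
-- int(num / 10) on these ints is truncation toward zero, i.e. Int.tdiv (exact for |num| ≤ 2^31)
def twoDigitsLoop (num : Int) (dig : Int) : Int :=
  if num ≠ 0 ∧ num ≠ -1 then twoDigitsLoop (num.tdiv 10) (dig + 1) else dig
termination_by num.natAbs
decreasing_by rw [pvTdivNatAbs]; omega

def two_digits (num : Int) : Bool :=
  if twoDigitsLoop num 0 = 2 then true else false

-- ===== PORT B =====
-- return 10 <= abs(num) < 100
def two_digits_alt (num : Int) : Bool :=
  decide (10 ≤ |num| ∧ |num| < 100)

-- ===== PRECONDITION & SPEC =====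
-- On negative inputs in [-199,-100] A returns True and in [-19,-10] A returns False, because its
-- 'num != -1' loop stop miscounts digits of negatives by one; B returns whether |num| really has
-- two digits, the intended meaning.
def D_two_digits (num : Int) : Prop :=
  (-199 ≤ num ∧ num ≤ -100) ∨ (-19 ≤ num ∧ num ≤ -10)
instance (num : Int) : Decidable (D_two_digits num) := by unfold D_two_digits; infer_instance

def Spec_two_digits (num : Int) (out : Bool) : Prop := ¬ D_two_digits num → out = two_digits_alt num
instance (num : Int) (out : Bool) : Decidable (Spec_two_digits num out) := by unfold Spec_two_digits; infer_instance

def pvDiffWitness_two_digits : Int := (-10)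
def pvDiffWitnessOut_two_digits : Bool × Bool := (false, true)

-- ===== CLAIM (what is proved, stated in full; the proofs are below) =====
def Claim_unchanged_two_digits : Prop := ∀ (num : Int), Dom_two_digits num → Spec_two_digits num (two_digits num)
def Claim_changed_two_digits : Prop := Dom_two_digits (pvDiffWitness_two_digits) ∧ D_two_digits (pvDiffWitness_two_digits) ∧ two_digits (pvDiffWitness_two_digits) = pvDiffWitnessOut_two_digits.1 ∧ two_digits_alt (pvDiffWitness_two_digits) = pvDiffWitnessOut_two_digits.2 ∧ pvDiffWitnessOut_two_digits.1 ≠ pvDiffWitnessOut_two_digits.2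
def Claim_exact_two_digits : Prop := ∀ (num : Int), Dom_two_digits num → D_two_digits num → two_digits num ≠ two_digits_alt num

-- ===== LEMMAS AND PROOFS =====

theorem loop_shift : ∀ (k : Nat) (num d : Int), num.natAbs ≤ k →
    twoDigitsLoop num d = twoDigitsLoop num 0 + d := by
  intro k
  induction k with
  | zero =>
    intro num d h
    have h0 : num = 0 := by omega
    subst h0
    have h1 : twoDigitsLoop 0 d = d := by rw [twoDigitsLoop.eq_def]; simp
    have h2 : twoDigitsLoop 0 0 = 0 := by rw [twoDigitsLoop.eq_def]; simp
    rw [h1, h2]; ring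
  | succ k ih =>
    intro num d h
    by_cases hc : num ≠ 0 ∧ num ≠ -1
    · have hb : (num.tdiv 10).natAbs ≤ k := by
        rw [pvTdivNatAbs]; omega
      rw [twoDigitsLoop.eq_def num d, twoDigitsLoop.eq_def num 0, if_pos hc, if_pos hc,
          ih _ (d + 1) hb, ih _ (0 + 1) hb]
      ring
    · rw [twoDigitsLoop.eq_def num d, twoDigitsLoop.eq_def num 0, if_neg hc, if_neg hc]
      ring

theorem loop_nonneg : ∀ (k : Nat) (num : Int), num.natAbs ≤ k → 0 ≤ twoDigitsLoop num 0 := by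
  intro k
  induction k with
  | zero =>
    intro num h
    have h0 : num = 0 := by omega
    subst h0
    rw [twoDigitsLoop]; simp
  | succ k ih =>
    intro num h
    by_cases hc : num ≠ 0 ∧ num ≠ -1
    · have hb : (num.tdiv 10).natAbs ≤ k := by
        rw [pvTdivNatAbs]; omega
      rw [twoDigitsLoop.eq_def, if_pos hc, loop_shift k _ (0 + 1) hb]
      have := ih _ hb
      omega
    · rw [twoDigitsLoop.eq_def, if_neg hc]

theorem loop_step (num : Int) :
    twoDigitsLoop num 0 =
      if num ≠ 0 ∧ num ≠ -1 then twoDigitsLoop (num.tdiv 10) 0 + 1 else 0 := by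
  rw [twoDigitsLoop.eq_def]
  by_cases hc : num ≠ 0 ∧ num ≠ -1
  · rw [if_pos hc, if_pos hc, loop_shift (num.tdiv 10).natAbs _ (0 + 1) le_rfl]
    ring
  · rw [if_neg hc, if_neg hc]

theorem loop_eq0 (num : Int) : twoDigitsLoop num 0 = 0 ↔ (num = 0 ∨ num = -1) := by
  rw [loop_step]
  by_cases hc : num ≠ 0 ∧ num ≠ -1
  · rw [if_pos hc]
    have := loop_nonneg (num.tdiv 10).natAbs _ le_rfl
    constructor
    · intro h; omega
    · intro h; exact absurd h (by tauto)
  · rw [if_neg hc]; tauto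

theorem loop_eq1 (num : Int) :
    twoDigitsLoop num 0 = 1 ↔
      (num ≠ 0 ∧ num ≠ -1) ∧ (num.tdiv 10 = 0 ∨ num.tdiv 10 = -1) := by
  rw [loop_step]
  by_cases hc : num ≠ 0 ∧ num ≠ -1
  · rw [if_pos hc]
    constructor
    · intro h; exact ⟨hc, (loop_eq0 _).1 (by omega)⟩
    · intro h
      have := (loop_eq0 (num.tdiv 10)).2 h.2
      omega
  · rw [if_neg hc]; tauto

theorem loop_eq2 (num : Int) :
    twoDigitsLoop num 0 = 2 ↔
      (num ≠ 0 ∧ num ≠ -1) ∧ (num.tdiv 10 ≠ 0 ∧ num.tdiv 10 ≠ -1) ∧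
        ((num.tdiv 10).tdiv 10 = 0 ∨ (num.tdiv 10).tdiv 10 = -1) := by
  rw [loop_step]
  by_cases hc : num ≠ 0 ∧ num ≠ -1
  · rw [if_pos hc]
    constructor
    · intro h
      have h1 := (loop_eq1 (num.tdiv 10)).1 (by omega)
      exact ⟨hc, h1.1, h1.2⟩
    · intro h
      have := (loop_eq1 (num.tdiv 10)).2 ⟨h.2.1, h.2.2⟩
      omega
  · rw [if_neg hc]; tauto

-- int(num/10) expressed through Euclidean division so that omega can reason about it
theorem pvTdivChar (n : Int) : n.tdiv 10 = if 0 ≤ n then n / 10 else -((-n) / 10) := by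
  rcases (em (0 ≤ n)) with h | h
  · simp [h, Int.tdiv_eq_ediv_of_nonneg h]
  · rw [if_neg (by omega), show n = -(-n) by ring, Int.neg_tdiv,
        Int.tdiv_eq_ediv_of_nonneg (by omega)]
    simp

theorem A_char (num : Int) :
    two_digits num = true ↔ ((10 ≤ num ∧ num ≤ 99) ∨ (-199 ≤ num ∧ num ≤ -20)) := by
  unfold two_digits
  rw [show (if twoDigitsLoop num 0 = 2 then true else false) = true ↔ twoDigitsLoop num 0 = 2 by
        split <;> simp_all]
  rw [loop_eq2, pvTdivChar num, pvTdivChar (if 0 ≤ num then num / 10 else -((-num) / 10))]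
  split_ifs <;> omega

theorem B_char (num : Int) :
    two_digits_alt num = true ↔ ((10 ≤ num ∧ num ≤ 99) ∨ (-99 ≤ num ∧ num ≤ -10)) := by
  unfold two_digits_alt
  rw [decide_eq_true_iff]
  rcases (em (0 ≤ num)) with h | h
  · rw [abs_of_nonneg h]; omega
  · rw [abs_of_neg (by omega)]; omega

-- ===== VERDICT (by name: the statement is the Claim_ definition above) =====
theorem two_digits_spec : Claim_unchanged_two_digits := by
  intro num _ hD
  have hA := A_char num
  have hB := B_char num
  unfold D_two_digits at hD
  cases hA' : two_digits num <;> cases hB' : two_digits_alt num <;> simp_all <;> omega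

theorem two_digits_changed : Claim_changed_two_digits := by
  unfold Claim_changed_two_digits
  refine ⟨by decide, by decide, ?_, by decide, by decide⟩
  have h := A_char pvDiffWitness_two_digits
  cases hx : two_digits pvDiffWitness_two_digits
  · rfl
  · rw [hx] at h
    have := h.1 rfl
    unfold pvDiffWitness_two_digits at this
    omega

theorem two_digits_tight : Claim_exact_two_digits := by
  intro num _ hD
  have hA := A_char num
  have hB := B_char num
  unfold D_two_digits at hD
  cases hA' : two_digits num <;> cases hB' : two_digits_alt num <;> simp_all <;> omega
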